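-- pv_equiv track=rewrite | github.com/seb2b/project_tic_tac_toe_ia | main.py | win_row
-- ===== SOURCE A (Python) =====
-- def win_row(board, player, nb_win_case):
--     for row in board:
--         isRow = 0
--         for col in row:
--             if col == player:
--                 isRow += 1
--                 if isRow == nb_win_case:
--                     return True
--             # Reset isRow on Void cases
--             elif isRow:
--                 isRow = 0
--     return False
-- ===== SOURCE B (Python) =====
-- def _runs(row):
--     """Run-length encode a row into (value, length) pairs."""
--     runs = []
--     while row:
--         n = 1
--         while n < len(row) and row[n] == row[0]:
--             n += 1
--         runs.append((row[0], n))
--         row = row[n:]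
--     return runs
--
--
-- def win_row(board, player, nb_win_case):
--     if nb_win_case < 1:
--         return False
--     return any(v == player and n >= nb_win_case
--                for row in board for v, n in _runs(row))
-- ===== Notes on version B (the rewrite author's own statement) =====
-- stated objective: idiomatic
-- what changed: B run-length-encodes each row once and asks whether any run of the player's mark is at least nb_win_case long, instead of A's stateful counter with mid-loop early return and resets.
import Mathlib
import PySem

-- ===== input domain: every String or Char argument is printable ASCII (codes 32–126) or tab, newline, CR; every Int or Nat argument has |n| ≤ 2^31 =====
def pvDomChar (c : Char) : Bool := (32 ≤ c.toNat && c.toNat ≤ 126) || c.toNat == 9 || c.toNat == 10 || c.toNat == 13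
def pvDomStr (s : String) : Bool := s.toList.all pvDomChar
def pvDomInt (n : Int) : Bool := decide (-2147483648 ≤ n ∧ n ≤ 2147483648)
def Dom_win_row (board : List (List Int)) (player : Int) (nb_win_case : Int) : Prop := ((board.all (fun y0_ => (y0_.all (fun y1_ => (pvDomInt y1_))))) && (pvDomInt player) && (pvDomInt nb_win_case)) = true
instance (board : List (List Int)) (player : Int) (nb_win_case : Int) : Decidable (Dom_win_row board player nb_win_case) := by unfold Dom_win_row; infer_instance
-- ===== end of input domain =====

-- B replaces A's stateful counter/reset scan by run-length-encoding each row and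
-- checking whether any run of the player's mark is at least nb_win_case long (idiomatic).

-- ===== PORT A =====
-- inner 'for col in row' loop of A, carrying the isRow counter; early 'return True' = result true
def winRowInner (player nb : Int) : List Int → Int → Bool
  | [], _ => false
  | col :: cols, isRow =>
    if col = player then
      if isRow + 1 = nb then true
      else winRowInner player nb cols (isRow + 1)
    else if isRow ≠ 0 then winRowInner player nb cols 0
    else winRowInner player nb cols isRow

def win_row (board : List (List Int)) (player : Int) (nb_win_case : Int) : Bool :=
  match board with
  | [] => false
  | row :: rest =>
    if winRowInner player nb_win_case row 0 then true
    else win_row rest player nb_win_case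

-- ===== PORT B =====
-- length of the inner 'while' scan: how many further leading cells equal x
def countRun (x : Int) : List Int → Nat
  | [] => 0
  | y :: ys => if y = x then 1 + countRun x ys else 0

-- _runs of Source B: run-length encoding
def runsRLE : List Int → List (Int × Nat)
  | [] => []
  | x :: ys => (x, 1 + countRun x ys) :: runsRLE (ys.drop (countRun x ys))
  termination_by l => l.length
  decreasing_by simp [List.length_drop]

def win_row_alt (board : List (List Int)) (player : Int) (nb_win_case : Int) : Bool :=
  if nb_win_case < 1 then false
  else board.any (fun row =>
    (runsRLE row).any (fun pr => pr.1 == player && decide (nb_win_case ≤ (pr.2 : Int))))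

-- ===== PRECONDITION & SPEC =====
def Spec_win_row (board : List (List Int)) (player : Int) (nb_win_case : Int) (out : Bool) : Prop := out = win_row_alt board player nb_win_case
instance (board : List (List Int)) (player : Int) (nb_win_case : Int) (out : Bool) : Decidable (Spec_win_row board player nb_win_case out) := by unfold Spec_win_row; infer_instance

-- ===== CLAIM (what is proved, stated in full; the proofs are below) =====
def Claim_equal_win_row : Prop := ∀ (board : List (List Int)) (player : Int) (nb_win_case : Int), Dom_win_row board player nb_win_case → Spec_win_row board player nb_win_case (win_row board player nb_win_case)

-- ===== LEMMAS AND PROOFS =====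

-- row-level check of B, for readability of the lemmas
def rowAny (player nb : Int) (row : List Int) : Bool :=
  (runsRLE row).any (fun pr => pr.1 == player && decide (nb ≤ (pr.2 : Int)))

-- if nb ≤ 0, A's counter (tested only at values ≥ k+1 ≥ 1) never equals nb
theorem inner_nonpos (p nb : Int) (hnb : nb ≤ 0) :
    ∀ (row : List Int) (k : Int), 0 ≤ k → winRowInner p nb row k = false := by
  intro row
  induction row with
  | nil => intro k _; rfl
  | cons c cs ih =>
    intro k hk
    simp only [winRowInner]
    split_ifs with h1 h2 h3
    · omega
    · exact ih (k + 1) (by omega)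
    · exact ih 0 (by omega)
    · exact ih k hk

-- consuming a maximal run of p's: true iff nb falls in the counter window, else continue after the run
theorem inner_run (p nb : Int) :
    ∀ (ys : List Int) (k : Int),
      winRowInner p nb (p :: ys) k = true ↔
        (k + 1 ≤ nb ∧ nb ≤ k + 1 + (countRun p ys : Int)) ∨
        winRowInner p nb (ys.drop (countRun p ys)) 0 = true := by
  intro ys
  induction ys with
  | nil =>
    intro k
    simp [winRowInner, countRun]
    omega
  | cons y ys' ih =>
    intro k
    by_cases hy : y = p
    · have hcr : countRun p (y :: ys') = 1 + countRun p ys' := by simp [countRun, hy]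
      have hdrop : (y :: ys').drop (countRun p (y :: ys')) = ys'.drop (countRun p ys') := by
        rw [hcr]
        have h1 : 1 + countRun p ys' = countRun p ys' + 1 := by omega
        rw [h1, List.drop_succ_cons]
      have step : winRowInner p nb (p :: y :: ys') k =
          if k + 1 = nb then true else winRowInner p nb (y :: ys') (k + 1) := by
        simp [winRowInner]
      rw [step, hdrop, hcr]
      split_ifs with h
      · constructor
        · intro _; left; push_cast; omega
        · intro _; rfl
      · rw [hy, ih (k + 1)]
        push_cast
        constructor
        · rintro (⟨h1, h2⟩ | h3)
          · left; constructor <;> omega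
          · right; exact h3
        · rintro (⟨h1, h2⟩ | h3)
          · left; constructor <;> omega
          · right; exact h3
    · have hcr : countRun p (y :: ys') = 0 := by simp [countRun]; omega
      have step : winRowInner p nb (p :: y :: ys') k =
          if k + 1 = nb then true else winRowInner p nb (y :: ys') (k + 1) := by
        simp [winRowInner]
      have hres : ∀ c : Int, winRowInner p nb (y :: ys') c = winRowInner p nb ys' 0 := by
        intro c
        simp only [winRowInner, if_neg hy]
        split_ifs with hc
        · rfl
        · have hc0 : c = 0 := by omega
          rw [hc0]
      rw [step, hcr]
      simp only [List.drop_zero, Nat.cast_zero]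
      split_ifs with h
      · constructor
        · intro _; left; omega
        · intro _; rfl
      · rw [hres, hres]
        constructor
        · intro h3; right; exact h3
        · rintro (⟨h1, h2⟩ | h3)
          · omega
          · exact h3

-- skipping a (maximal) non-player run does not change B's row check
theorem rowAny_drop (p nb x : Int) (hx : x ≠ p) (ys : List Int) :
    rowAny p nb ys = rowAny p nb (ys.drop (countRun x ys)) := by
  cases ys with
  | nil => simp [countRun]
  | cons y ys' =>
    by_cases hy : y = x
    · subst hy
      have hcr : countRun y (y :: ys') = 1 + countRun y ys' := by simp [countRun]
      have hdrop : (y :: ys').drop (countRun y (y :: ys')) = ys'.drop (countRun y ys') := by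
        rw [hcr]
        have h1 : 1 + countRun y ys' = countRun y ys' + 1 := by omega
        rw [h1, List.drop_succ_cons]
      rw [hdrop]
      have hyp : (y == p) = false := by simpa using hx
      show rowAny p nb (y :: ys') = _
      unfold rowAny
      rw [runsRLE]
      simp [hyp]
    · have hcr : countRun x (y :: ys') = 0 := by simp [countRun]; omega
      rw [hcr, List.drop_zero]

-- per-row equivalence for nb ≥ 1, by well-founded recursion matching runsRLE's
theorem inner_eq_rowAny (p nb : Int) (hnb : 1 ≤ nb) (row : List Int) :
    winRowInner p nb row 0 = rowAny p nb row := by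
  match row with
  | [] => simp [winRowInner, rowAny, runsRLE]
  | x :: ys =>
    have hrec := inner_eq_rowAny p nb hnb (ys.drop (countRun x ys))
    by_cases hx : x = p
    · subst hx
      have h1 := inner_run x nb ys 0
      have h2 : rowAny x nb (x :: ys)
          = (decide (nb ≤ 1 + (countRun x ys : Int)) || rowAny x nb (ys.drop (countRun x ys))) := by
        unfold rowAny
        rw [runsRLE]
        simp [add_comm]
      rw [h2, ← hrec]
      rw [Bool.eq_iff_iff]
      rw [h1]
      simp only [Bool.or_eq_true, decide_eq_true_eq]
      constructor
      · rintro (⟨ha, hb⟩ | hc)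
        · left; omega
        · right; exact hc
      · rintro (ha | hb)
        · left; constructor <;> omega
        · right; exact hb
    · have hstep : winRowInner p nb (x :: ys) 0 = winRowInner p nb ys 0 := by
        simp [winRowInner, hx]
      have hys := inner_eq_rowAny p nb hnb ys
      have h2 : rowAny p nb (x :: ys) = rowAny p nb (ys.drop (countRun x ys)) := by
        have hxp : (x == p) = false := by simpa using hx
        unfold rowAny
        rw [runsRLE]
        simp [hxp]
      rw [hstep, hys, h2, ← rowAny_drop p nb x hx ys]
  termination_by row.length
  decreasing_by
  · simp [List.length_drop]
  · simp

-- A never wins when nb_win_case < 1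
theorem win_row_nonpos (p nb : Int) (hnb : nb < 1) :
    ∀ (board : List (List Int)), win_row board p nb = false := by
  intro board
  induction board with
  | nil => rfl
  | cons row rest ih =>
    simp only [win_row]
    rw [inner_nonpos p nb (by omega) row 0 (by omega)]
    simpa using ih

-- A's outer loop is an 'any' of the per-row check, for nb_win_case ≥ 1
theorem win_row_pos (p nb : Int) (hnb : 1 ≤ nb) :
    ∀ (board : List (List Int)), win_row board p nb = board.any (rowAny p nb) := by
  intro board
  induction board with
  | nil => rfl
  | cons row rest ih =>
    simp only [win_row, List.any_cons]
    rw [inner_eq_rowAny p nb hnb row]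
    cases h : rowAny p nb row
    · simpa using ih
    · simp

-- ===== VERDICT (by name: the statement is the Claim_ definition above) =====
theorem win_row_spec : Claim_equal_win_row := by
  intro board player nb _
  unfold Spec_win_row win_row_alt
  by_cases hnb : nb < 1
  · rw [if_pos hnb, win_row_nonpos player nb hnb board]
  · rw [if_neg hnb, win_row_pos player nb (by omega) board]
    rfl
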